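-- pv_equiv track=rewrite | github.com/pepamengual/NetCleave | deprecated/predictor/core/training_data_generator.py | split_peptidome
-- ===== SOURCE A (Python) =====
-- def split_peptidome(peptidome):
--     peptidome_residues = {}
--     residues = "ACDEFGHIKLMNPQRSTVWY"
--     residues_set = set([residue for residue in residues])
--
--     for peptide in peptidome:
--         peptide_set = set(peptide)
--         if not peptide_set - residues_set:
--             peptidome_residues.setdefault(peptide[3], []).append(peptide)
--     return peptidome_residues
-- ===== SOURCE B (Python) =====
-- def split_peptidome(peptidome):
--     residues_set = set("ACDEFGHIKLMNPQRSTVWY")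
--     valid = [p for p in peptidome if set(p) <= residues_set]
--     keys = []
--     for p in valid:
--         k = p[3]
--         if k not in keys:
--             keys.append(k)
--     return {k: [p for p in valid if p[3] == k] for k in keys}
-- ===== Notes on version B (the rewrite author's own statement) =====
-- stated objective: alternative
-- what changed: Replaced the single-pass setdefault-into-dict grouping with a three-phase decomposition: filter the valid peptides, collect the distinct 4th residues in first-occurrence order, then build each group by a per-key scan of the valid list.
import Mathlib
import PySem

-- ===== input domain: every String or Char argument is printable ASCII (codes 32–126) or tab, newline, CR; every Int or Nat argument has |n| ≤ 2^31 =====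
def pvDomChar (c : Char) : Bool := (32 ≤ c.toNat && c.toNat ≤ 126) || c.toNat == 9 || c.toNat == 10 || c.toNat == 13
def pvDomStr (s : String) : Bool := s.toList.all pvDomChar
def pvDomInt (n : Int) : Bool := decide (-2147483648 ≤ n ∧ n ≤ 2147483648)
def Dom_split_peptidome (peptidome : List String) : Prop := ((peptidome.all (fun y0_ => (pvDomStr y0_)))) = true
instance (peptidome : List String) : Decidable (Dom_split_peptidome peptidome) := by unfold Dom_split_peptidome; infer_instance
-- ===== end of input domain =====

-- B replaces A's single-pass setdefault-into-dict grouping by: filter the valid peptides, collect the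
-- distinct 4th residues in first-occurrence order, then build each group by a per-key scan (objective:
-- alternative decomposition, not faster).

-- peptide[3] as a 1-character Python string; the none case (IndexError) is excluded by Pre_
def pvKey (p : String) : String := ((PySem.Str.pyGet? p 3).map String.singleton).getD ""

-- ===== PORT A =====
def split_peptidome (peptidome : List String) : List (String × List String) :=
  let residues_set : PySem.Set Char := PySem.Set.ofList ("ACDEFGHIKLMNPQRSTVWY".toList)
  (peptidome.foldl (fun d peptide =>
      let peptide_set : PySem.Set Char := PySem.Set.ofList peptide.toList
      if (PySem.Set.diff peptide_set residues_set).isEmpty then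
        -- peptidome_residues.setdefault(peptide[3], []).append(peptide)
        PySem.Dict.modify d (pvKey peptide) [] (fun g => g ++ [peptide])
      else d)
    PySem.Dict.empty).items

-- ===== PORT B =====
def split_peptidome_alt (peptidome : List String) : List (String × List String) :=
  let residues_set : PySem.Set Char := PySem.Set.ofList ("ACDEFGHIKLMNPQRSTVWY".toList)
  let valid := peptidome.filter (fun p => PySem.Set.issubset (PySem.Set.ofList p.toList) residues_set)
  let keys := valid.foldl (fun ks p =>
      let k := pvKey p
      if ks.contains k then ks else ks ++ [k]) []
  keys.map (fun k => (k, valid.filter (fun p => pvKey p == k)))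

-- ===== PRECONDITION & SPEC =====
-- Pre_ excludes exactly the inputs where Python A raises IndexError: a peptide made only of the 20
-- residue letters (including the empty string) but shorter than 4, whose peptide[3] access fails.
def Pre_split_peptidome (peptidome : List String) : Prop :=
  (peptidome.all (fun p =>
    !(p.toList.all (fun c => "ACDEFGHIKLMNPQRSTVWY".toList.contains c)) || 4 ≤ p.toList.length)) = true
instance (peptidome : List String) : Decidable (Pre_split_peptidome peptidome) := by
  unfold Pre_split_peptidome; infer_instance
def pvWitness_split_peptidome : List String := ["ACDE", "AXZ!", "WWWWY"]

def Spec_split_peptidome (peptidome : List String) (out : List (String × List String)) : Prop := out = split_peptidome_alt peptidome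
instance (peptidome : List String) (out : List (String × List String)) : Decidable (Spec_split_peptidome peptidome out) := by unfold Spec_split_peptidome; infer_instance

-- ===== CLAIM (what is proved, stated in full; the proofs are below) =====
def Claim_equal_split_peptidome : Prop := ∀ (peptidome : List String), Dom_split_peptidome peptidome → Pre_split_peptidome peptidome → Spec_split_peptidome peptidome (split_peptidome peptidome)

-- ===== LEMMAS AND PROOFS =====

-- A's emptiness test of the set difference coincides with B's subset test
lemma pv_valid_eq (p : String) :
    (PySem.Set.diff (PySem.Set.ofList p.toList) (PySem.Set.ofList ("ACDEFGHIKLMNPQRSTVWY".toList))).isEmpty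
      = PySem.Set.issubset (PySem.Set.ofList p.toList) (PySem.Set.ofList ("ACDEFGHIKLMNPQRSTVWY".toList)) := by
  rw [Bool.eq_iff_iff, List.isEmpty_iff, List.eq_nil_iff_forall_not_mem, PySem.Set.issubset_iff]
  constructor
  · intro h x hx
    by_contra hnx
    exact h x ((PySem.Set.mem_diff _ _ x).mpr ⟨hx, hnx⟩)
  · intro h x hx
    rcases (PySem.Set.mem_diff _ _ x).mp hx with ⟨hs, hn⟩
    exact hn (h x hs)

-- a fold that skips on a condition is a fold over the filtered list
lemma pv_foldl_if_filter {α β : Type} (c : α → Bool) (f : β → α → β) :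
    ∀ (l : List α) (d : β),
      l.foldl (fun d p => if c p then f d p else d) d = (l.filter c).foldl f d := by
  intro l
  induction l with
  | nil => intro d; rfl
  | cons x xs ih =>
    intro d
    by_cases h : c x = true
    · simp [h, ih]
    · simp at h
      simp [h, ih]

-- a Dict with Nodup keys is the map of its getD over its keys
lemma pv_items_eq_map_keys_aux {ν : Type} (dflt : ν) :
    ∀ (its : List (String × ν)), (PySem.Dict.mk its).keys.Nodup →
      (PySem.Dict.mk its).items = (PySem.Dict.mk its).keys.map
        (fun k => (k, (PySem.Dict.mk its).getD k dflt)) := by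
  intro its
  induction its with
  | nil => intro _; rfl
  | cons kv rest ih =>
    intro hnd
    obtain ⟨k, v⟩ := kv
    simp only [PySem.Dict.keys] at hnd ih ⊢
    simp only [List.map_cons] at hnd ⊢
    rw [List.nodup_cons] at hnd
    obtain ⟨hk, hrest⟩ := hnd
    refine List.cons_eq_cons.mpr ⟨?_, ?_⟩
    · simp [PySem.Dict.getD_eq_get?_getD, PySem.Dict.get?_mk_cons]
    · have hmaps : (rest.map (fun x => x.1)).map
            (fun k' => (k', (PySem.Dict.mk ((k, v) :: rest)).getD k' dflt))
          = (rest.map (fun x => x.1)).map (fun k' => (k', (PySem.Dict.mk rest).getD k' dflt)) := by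
        apply List.map_congr_left
        intro k' hk'
        have hne : k ≠ k' := by rintro rfl; exact hk hk'
        simp [PySem.Dict.getD_eq_get?_getD, PySem.Dict.get?_mk_cons, hne]
      rw [hmaps]
      exact ih hrest

lemma pv_items_eq_map_keys {ν : Type} (d : PySem.Dict String ν) (dflt : ν)
    (h : d.keys.Nodup) : d.items = d.keys.map (fun k => (k, d.getD k dflt)) := by
  obtain ⟨its⟩ := d
  exact pv_items_eq_map_keys_aux dflt its h

-- keys of the grouping fold, starting from the empty dict
lemma pv_keys_fold (l : List String) :
    (l.foldl (fun d p => PySem.Dict.modify d (pvKey p) [] (fun g => g ++ [p])) PySem.Dict.empty).keys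
      = PySem.Set.ofList (l.map pvKey) := by
  have h := PySem.Dict.keys_foldl_modify_key l pvKey ([] : List String)
      (fun _ p => fun g => g ++ [p]) PySem.Dict.empty
  simpa [PySem.Set.update_nil_left] using h

-- group contents of the grouping fold
lemma pv_getD_fold (l : List String) (k : String) :
    (l.foldl (fun d p => PySem.Dict.modify d (pvKey p) [] (fun g => g ++ [p])) PySem.Dict.empty).getD k []
      = l.filter (fun p => pvKey p == k) := by
  have h := PySem.Dict.getD_foldl_modify_append (l.map (fun p => (pvKey p, p))) PySem.Dict.empty k
  rw [List.foldl_map] at h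
  simpa [List.filter_map, Function.comp_def] using h

-- B's first-occurrence key collection is PySem.Set.ofList of the mapped keys
lemma pv_keys_alt (l : List String) :
    l.foldl (fun ks p => if ks.contains (pvKey p) then ks else ks ++ [pvKey p]) []
      = PySem.Set.ofList (l.map pvKey) := by
  rw [PySem.Set.ofList_eq_foldl, List.foldl_map]
  rfl

-- ===== VERDICT (by name: the statement is the Claim_ definition above) =====
theorem split_peptidome_spec : Claim_equal_split_peptidome := by
  intro peptidome _ _
  unfold Spec_split_peptidome split_peptidome split_peptidome_alt
  simp only []
  rw [pv_foldl_if_filter]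
  have hfe : peptidome.filter
        (fun p => (PySem.Set.diff (PySem.Set.ofList p.toList)
          (PySem.Set.ofList ("ACDEFGHIKLMNPQRSTVWY".toList))).isEmpty)
      = peptidome.filter (fun p => PySem.Set.issubset (PySem.Set.ofList p.toList)
          (PySem.Set.ofList ("ACDEFGHIKLMNPQRSTVWY".toList))) := by
    apply List.filter_congr
    intro p _
    exact pv_valid_eq p
  rw [hfe]
  set lv := peptidome.filter (fun p => PySem.Set.issubset (PySem.Set.ofList p.toList)
      (PySem.Set.ofList ("ACDEFGHIKLMNPQRSTVWY".toList))) with hlv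
  -- A's dict has Nodup keys, so its items are keys paired with their getD values
  have hnd : (lv.foldl (fun d p => PySem.Dict.modify d (pvKey p) [] (fun g => g ++ [p]))
      PySem.Dict.empty).keys.Nodup :=
    PySem.Dict.nodup_keys_foldl_modify_key lv pvKey []
      (fun _ p => fun g => g ++ [p]) PySem.Dict.empty (by simp [PySem.Dict.keys, PySem.Dict.empty])
  rw [pv_items_eq_map_keys _ ([] : List String) hnd, pv_keys_fold, pv_keys_alt]
  apply List.map_congr_left
  intro k _
  rw [pv_getD_fold]
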